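-- pv_equiv track=rewrite | github.com/dirtysalt/codes | contest/geeksforgeeks/shortest-path-from-1-to-n.py | solve
-- ===== SOURCE A (Python) =====
-- def solve(n):
--     INF = 1 << 31
--     dist = [INF] * (n + 1)
--     dist[1] = 0
--     sps = set(range(1, n + 1))
--
--     while True:
--         min_dist = INF
--         min_node = None
--         for v in sps:
--             if dist[v] < min_dist:
--                 min_node = v
--                 min_dist = dist[v]
--         if min_node is None:
--             break
--         if min_node == n:
--             break
--         sps.remove(min_node)
--
--         nxts = []
--         if (min_node + 1) <= n:
--             nxts.append(min_node + 1)
--         if min_node * 3 <= n: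
--             nxts.append(min_node * 3)
--
--         for v2 in nxts:
--             dist[v2] = min(dist[v2], min_dist + 1)
--     return dist[n]
-- ===== SOURCE B (Python) =====
-- def solve(n):
--     # Bottom-up DP: dist to i is via i-1 or i//3 (when 3 | i), both smaller.
--     dp = [0, 0]
--     for i in range(2, n + 1):
--         s = dp[i - 1] + 1
--         if i % 3 == 0:
--             s = min(s, dp[i // 3] + 1)
--         dp.append(s)
--     return dp[n]
-- ===== Notes on version B (the rewrite author's own statement) =====
-- stated objective: faster
-- what changed: Replaced the O(n^2) hand-rolled Dijkstra (repeated linear scans over an unvisited set) by a single O(n) bottom-up DP pass using dist[i] = min(dist[i-1], dist[i//3] if 3|i) + 1, valid because both edge types come from strictly smaller nodes.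
-- outside the precondition, e.g. on solve(0): A raises IndexError, B returns 0
import Mathlib
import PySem

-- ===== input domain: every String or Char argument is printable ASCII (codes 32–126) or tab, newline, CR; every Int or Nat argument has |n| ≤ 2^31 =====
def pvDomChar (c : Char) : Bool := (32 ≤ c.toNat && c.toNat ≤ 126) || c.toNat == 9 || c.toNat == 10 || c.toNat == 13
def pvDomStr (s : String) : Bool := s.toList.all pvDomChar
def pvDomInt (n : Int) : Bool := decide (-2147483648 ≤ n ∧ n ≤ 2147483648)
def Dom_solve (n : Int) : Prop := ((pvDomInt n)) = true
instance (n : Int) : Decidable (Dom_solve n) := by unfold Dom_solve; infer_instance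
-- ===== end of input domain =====

-- B replaces A's O(n^2) hand-rolled Dijkstra by a single bottom-up DP pass over 2..n;
-- objective: faster (linear number of array reads instead of a linear scan per extracted node).

-- ===== PORT A =====
-- Port of A: Dijkstra over nodes 1..n with unit-weight edges v -> v+1 and v -> 3v.
-- Python's `for v in sps` iterates a set in hash order, which PySem does not model; the
-- value A returns (dist[n]) is the same for ANY choice of minimal node (proved below via
-- the invariant pvInv), so consuming the PySem.Set in its list order is exact for the
-- returned value.
def pvINF : Int := 2147483648  -- 1 << 31

-- `for v in sps: if dist[v] < min_dist: min_node, min_dist = v, dist[v]`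
-- dist[v] is always in range here (v ∈ 1..n, len(dist) = n+1), so the total pyGetD is exact.
def pvFindMin (dist : Array Int) (sps : List Int) : Int × Option Int :=
  sps.foldl
    (fun acc v =>
      if (dist[v.toNat]?).getD 0 < acc.1 then ((dist[v.toNat]?).getD 0, some v)
      else acc)
    (pvINF, none)

-- the `nxts` block and `for v2 in nxts: dist[v2] = min(dist[v2], min_dist + 1)`
-- (dist[v2] is in range: v2 ≤ n)
def pvRelax (n : Int) (min_node : Int) (min_dist : Int) (dist : Array Int) : Array Int :=
  let nxts := (if min_node + 1 ≤ n then [min_node + 1] else []) ++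
              (if min_node * 3 ≤ n then [min_node * 3] else [])
  nxts.foldl
    (fun d v2 => d.setIfInBounds v2.toNat (min ((d[v2.toNat]?).getD 0) (min_dist + 1)))
    dist

-- `while True:` — fuel bounds the number of iterations (each non-break iteration removes
-- one element from sps); called with |sps| + 1, which the proofs show is never exhausted.
def pvLoop (n : Int) (fuel : Nat) (dist : Array Int) (sps : PySem.Set Int) : Array Int :=
  match fuel with
  | 0 => dist
  | fuel + 1 =>
    let r := pvFindMin dist sps
    match r.2 with
    | none => dist
    | some m =>
      if m = n then dist
      else pvLoop n fuel (pvRelax n m r.1 dist) ((PySem.Set.remove? sps m).getD sps)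

def solve (n : Int) : Int :=
  let dist := (PySem.List.pyRepeat [pvINF] (n + 1)).toArray
  let dist := dist.setIfInBounds 1 0
  let sps : PySem.Set Int := PySem.Set.ofList (PySem.List.pyRange 1 (n + 1) 1)
  let dist := pvLoop n (sps.length + 1) dist sps
  (dist[n.toNat]?).getD 0

-- ===== PORT B =====
-- Source B: dp = [0, 0]; for i in range(2, n+1): append min-of-predecessors; return dp[n].
-- dp[i-1] and dp[i//3] are always in range (len(dp) = i when i is processed), so the
-- total pyGetD is exact.
def pvStep (dp : List Int) (i : Int) : List Int :=
  let s := PySem.List.pyGetD dp (i - 1) 0 + 1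
  let s := if PySem.Int.mod i 3 = 0
           then min s (PySem.List.pyGetD dp (PySem.Int.floordiv i 3) 0 + 1)
           else s
  dp ++ [s]

def solve_alt (n : Int) : Int :=
  PySem.List.pyGetD ((PySem.List.pyRange 2 (n + 1) 1).foldl pvStep [0, 0]) n 0

-- ===== PRECONDITION & SPEC =====
-- A raises IndexError (at `dist[1] = 0`) for every n ≤ 0; Pre_ excludes exactly those inputs.
def Pre_solve (n : Int) : Prop := 1 ≤ n
instance (n : Int) : Decidable (Pre_solve n) := by unfold Pre_solve; infer_instance
def pvWitness_solve : Int := 5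

def Spec_solve (n : Int) (out : Int) : Prop := out = solve_alt n
instance (n : Int) (out : Int) : Decidable (Spec_solve n out) := by unfold Spec_solve; infer_instance

-- ===== CLAIM (what is proved, stated in full; the proofs are below) =====
def Claim_equal_solve : Prop := ∀ (n : Int), Dom_solve n → Pre_solve n → Spec_solve n (solve n)

-- ===== LEMMAS AND PROOFS =====
def pvD : Nat → Nat
  | 0 => 0
  | 1 => 0
  | (v + 2) =>
    if (v + 2) % 3 = 0 then min (pvD (v + 1)) (pvD ((v + 2) / 3)) + 1
    else pvD (v + 1) + 1
decreasing_by
  · omega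
  · exact Nat.div_lt_self (by omega) (by omega)
  · omega

lemma pvD_two_le (k : Nat) (h : 2 ≤ k) :
    pvD k = (if k % 3 = 0 then min (pvD (k - 1)) (pvD (k / 3)) else pvD (k - 1)) + 1 := by
  obtain ⟨v, rfl⟩ : ∃ v, k = v + 2 := ⟨k - 2, by omega⟩
  rw [pvD]
  split_ifs with h1 <;> simp

lemma pvD_le (k : Nat) (h : 1 ≤ k) : pvD k ≤ k - 1 := by
  induction k using Nat.strong_induction_on with
  | _ k ih =>
    match k, h with
    | 1, _ => simp [pvD]
    | (v+2), _ =>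
      rw [pvD_two_le _ (by omega)]
      simp only [show v + 2 - 1 = v + 1 from rfl]
      have h1 := ih (v+1) (by omega) (by omega)
      split_ifs with h3
      · have h2 : min (pvD (v+1)) (pvD ((v+2)/3)) ≤ pvD (v+1) := min_le_left _ _
        omega
      · omega

lemma pvD_succ_le (k : Nat) : pvD (k + 1) ≤ pvD k + 1 := by
  match k with
  | 0 => simp [pvD]
  | (v+1) =>
    rw [pvD_two_le (v+2) (by omega)]
    simp only [show v + 2 - 1 = v + 1 from rfl]
    split_ifs with h3
    · have h2 : min (pvD (v+1)) (pvD ((v+2)/3)) ≤ pvD (v+1) := min_le_left _ _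
      omega
    · omega

lemma pvD_three_mul_le (k : Nat) (h : 1 ≤ k) : pvD (3 * k) ≤ pvD k + 1 := by
  rw [pvD_two_le (3*k) (by omega)]
  have h3 : 3 * k % 3 = 0 := by omega
  have h4 : 3 * k / 3 = k := by omega
  rw [if_pos h3, h4]
  have h2 : min (pvD (3*k-1)) (pvD k) ≤ pvD k := min_le_right _ _
  omega

def pvdI (v : Int) : Int := (pvD v.toNat : Int)

def pvEdge (n u v : Int) : Prop := (v = u + 1 ∨ v = 3 * u) ∧ v ≤ n

lemma pvdI_nonneg (v : Int) : 0 ≤ pvdI v := by simp [pvdI]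

lemma pvdI_le (v : Int) (h : 1 ≤ v) : pvdI v ≤ v - 1 := by
  have h1 : 1 ≤ v.toNat := by omega
  have := pvD_le v.toNat h1
  unfold pvdI
  omega

lemma pvdI_edge_le {n u v : Int} (hu : 1 ≤ u) (he : pvEdge n u v) : pvdI v ≤ pvdI u + 1 := by
  obtain ⟨h1 | h1, -⟩ := he
  · subst h1
    have h2 : (u + 1).toNat = u.toNat + 1 := by omega
    have := pvD_succ_le u.toNat
    unfold pvdI; rw [h2]; exact_mod_cast this
  · subst h1
    have h2 : (3 * u).toNat = 3 * u.toNat := by omega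
    have := pvD_three_mul_le u.toNat (by omega)
    unfold pvdI; rw [h2]; exact_mod_cast this

lemma pvdI_pred {n v : Int} (h2 : 2 ≤ v) (hn : v ≤ n) :
    ∃ p, 1 ≤ p ∧ p < v ∧ pvEdge n p v ∧ pvdI v = pvdI p + 1 := by
  have hk : 2 ≤ v.toNat := by omega
  have hrec := pvD_two_le v.toNat hk
  by_cases h3 : v.toNat % 3 = 0
  · rw [if_pos h3] at hrec
    by_cases hm : pvD (v.toNat / 3) ≤ pvD (v.toNat - 1)
    · -- p = v / 3
      refine ⟨v / 3, ?_, ?_, ⟨Or.inr ?_, hn⟩, ?_⟩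
      · omega
      · omega
      · omega
      · have he : (v / 3).toNat = v.toNat / 3 := by omega
        unfold pvdI
        rw [he, hrec, min_eq_right hm]; push_cast; ring
    · -- p = v - 1
      refine ⟨v - 1, by omega, by omega, ⟨Or.inl (by ring), hn⟩, ?_⟩
      have he : (v - 1).toNat = v.toNat - 1 := by omega
      unfold pvdI
      rw [he, hrec, min_eq_left (by omega)]; push_cast; ring
  · rw [if_neg h3] at hrec
    refine ⟨v - 1, by omega, by omega, ⟨Or.inl (by ring), hn⟩, ?_⟩
    have he : (v - 1).toNat = v.toNat - 1 := by omega
    unfold pvdI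
    rw [he, hrec]; push_cast; ring

def pvGet (dist : Array Int) (v : Int) : Int := (dist[v.toNat]?).getD 0

lemma pvFold_facts (dist : Array Int) :
    ∀ (sps : List Int) (acc : Int × Option Int),
      (sps.foldl
        (fun acc v =>
          if (dist[v.toNat]?).getD 0 < acc.1 then ((dist[v.toNat]?).getD 0, some v)
          else acc) acc).1 ≤ acc.1 ∧
      (∀ v ∈ sps, (sps.foldl
        (fun acc v =>
          if (dist[v.toNat]?).getD 0 < acc.1 then ((dist[v.toNat]?).getD 0, some v)
          else acc) acc).1 ≤ pvGet dist v) ∧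
      ((sps.foldl
        (fun acc v =>
          if (dist[v.toNat]?).getD 0 < acc.1 then ((dist[v.toNat]?).getD 0, some v)
          else acc) acc) = acc ∨
        ∃ m ∈ sps,
          (sps.foldl
            (fun acc v =>
              if (dist[v.toNat]?).getD 0 < acc.1 then ((dist[v.toNat]?).getD 0, some v)
              else acc) acc).2 = some m ∧
          (sps.foldl
            (fun acc v =>
              if (dist[v.toNat]?).getD 0 < acc.1 then ((dist[v.toNat]?).getD 0, some v)
              else acc) acc).1 = pvGet dist m) := by
  intro sps
  induction sps with
  | nil => simp
  | cons x xs ih =>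
    intro acc
    simp only [List.foldl_cons]
    by_cases hx : (dist[x.toNat]?).getD 0 < acc.1
    · rw [if_pos hx]
      obtain ⟨ih1, ih2, ih3⟩ := ih ((dist[x.toNat]?).getD 0, some x)
      refine ⟨by simpa using le_trans ih1 (le_of_lt hx), ?_, ?_⟩
      · intro v hv
        rcases List.mem_cons.mp hv with rfl | hv
        · exact ih1
        · exact ih2 v hv
      · rcases ih3 with heq | ⟨m, hm, h2, h1⟩
        · exact Or.inr ⟨x, List.mem_cons_self .., by rw [heq], by rw [heq]; rfl⟩
        · exact Or.inr ⟨m, List.mem_cons_of_mem _ hm, h2, h1⟩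
    · rw [if_neg hx]
      obtain ⟨ih1, ih2, ih3⟩ := ih acc
      refine ⟨ih1, ?_, ?_⟩
      · intro v hv
        rcases List.mem_cons.mp hv with rfl | hv
        · exact le_trans ih1 (not_lt.mp hx)
        · exact ih2 v hv
      · rcases ih3 with heq | ⟨m, hm, h2, h1⟩
        · exact Or.inl heq
        · exact Or.inr ⟨m, List.mem_cons_of_mem _ hm, h2, h1⟩

lemma pvFindMin_none {dist : Array Int} {sps : List Int} (h : (pvFindMin dist sps).2 = none) :
    ∀ v ∈ sps, pvINF ≤ pvGet dist v := by
  unfold pvFindMin at h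
  intro v hv
  obtain ⟨h1, h2, h3⟩ := pvFold_facts dist sps (pvINF, none)
  rcases h3 with heq | ⟨m, hm, hsome, -⟩
  · have := h2 v hv
    rw [heq] at this
    exact this
  · rw [hsome] at h; exact absurd h (by simp)

lemma pvFindMin_some {dist : Array Int} {sps : List Int} {m : Int} (h : (pvFindMin dist sps).2 = some m) :
    m ∈ sps ∧ (pvFindMin dist sps).1 = pvGet dist m ∧
      ∀ v ∈ sps, pvGet dist m ≤ pvGet dist v := by
  unfold pvFindMin at h ⊢
  obtain ⟨h1, h2, h3⟩ := pvFold_facts dist sps (pvINF, none)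
  rcases h3 with heq | ⟨m', hm', hsome, hval⟩
  · rw [heq] at h; exact absurd h (by simp)
  · rw [show m' = m by rw [hsome] at h; exact (Option.some_inj.mp h)] at hm' hval
    exact ⟨hm', hval, fun v hv => hval ▸ h2 v hv⟩

def pvInv (n : Int) (dist : Array Int) (sps : List Int) : Prop :=
  dist.size = (n + 1).toNat ∧
  sps.Nodup ∧
  (∀ v ∈ sps, 1 ≤ v ∧ v ≤ n) ∧
  n ∈ sps ∧
  (∀ v, 1 ≤ v → v ≤ n → v ∉ sps → pvGet dist v = pvdI v) ∧
  (∀ v ∈ sps, pvdI v ≤ pvGet dist v) ∧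
  (∀ u v, 1 ≤ u → u ≤ n → u ∉ sps → v ∈ sps → pvEdge n u v → pvGet dist v ≤ pvdI u + 1) ∧
  (1 ∈ sps → pvGet dist 1 = 0)

lemma pvReach {n : Int} {dist : Array Int} {sps : List Int} (inv : pvInv n dist sps) :
    ∀ v ∈ sps, ∃ w ∈ sps, pvGet dist w ≤ pvdI v := by
  obtain ⟨-, -, h3, -, -, -, h7, h8⟩ := inv
  suffices aux : ∀ (k : Nat) (v : Int), v ∈ sps → pvD v.toNat = k →
      ∃ w ∈ sps, pvGet dist w ≤ pvdI v from fun v hv => aux _ v hv rfl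
  intro k
  induction k using Nat.strong_induction_on with
  | _ k ih =>
    intro v hv hk
    obtain ⟨hv1, hvn⟩ := h3 v hv
    by_cases hone : v = 1
    · subst hone
      refine ⟨1, hv, ?_⟩
      rw [h8 hv]
      exact pvdI_nonneg 1
    · obtain ⟨p, hp1, hpv, hpe, hpd⟩ := pvdI_pred (by omega) hvn
      by_cases hps : p ∈ sps
      · have hlt : pvD p.toNat < k := by
          have : pvD v.toNat = pvD p.toNat + 1 := by
            have := hpd
            unfold pvdI at this
            exact_mod_cast this
          omega
        obtain ⟨w, hw, hle⟩ := ih _ hlt p hps rfl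
        exact ⟨w, hw, le_trans hle (by omega)⟩
      · refine ⟨v, hv, ?_⟩
        have := h7 p v hp1 (by omega) hps hv hpe
        omega

lemma pvExtract {n : Int} {dist : Array Int} {sps : List Int} {m : Int} (inv : pvInv n dist sps)
    (hm : m ∈ sps) (hmin : ∀ v ∈ sps, pvGet dist m ≤ pvGet dist v) :
    pvGet dist m = pvdI m := by
  obtain ⟨w, hw, hle⟩ := pvReach inv m hm
  have h1 := inv.2.2.2.2.2.1 m hm
  have h2 := hmin w hw
  omega

lemma pvGet_set (dist : Array Int) (j : Nat) (v x : Int) (hj : j < dist.size)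
    (hv : 0 ≤ v) (hvlen : v < (dist.size : Int)) :
    pvGet (dist.setIfInBounds j x) v = if v.toNat = j then x else pvGet dist v := by
  unfold pvGet
  rw [Array.getElem?_setIfInBounds]
  by_cases he : j = v.toNat
  · rw [if_pos he, if_pos (by omega), if_pos (by omega)]
    rfl
  · rw [if_neg he, if_neg (by omega)]

lemma pvRelax_size (n m md : Int) (dist : Array Int) :
    (pvRelax n m md dist).size = dist.size := by
  unfold pvRelax
  split_ifs <;> simp [Array.size_setIfInBounds]

lemma pvGet_pvRelax {n m md : Int} {dist : Array Int} (hlen : dist.size = (n + 1).toNat)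
    (h1 : 1 ≤ m) (hmn : m ≤ n) (v : Int) (hv : 0 ≤ v) (hvn : v ≤ n) :
    pvGet (pvRelax n m md dist) v =
      if (v = m + 1 ∨ v = 3 * m) ∧ v ≤ n then min (pvGet dist v) (md + 1)
      else pvGet dist v := by
  have hL : ((dist.size : Int)) = n + 1 := by omega
  have hvlen : v < (dist.size : Int) := by omega
  by_cases hc1 : m + 1 ≤ n <;> by_cases hc2 : m * 3 ≤ n <;>
    simp only [pvRelax, if_pos, hc1, hc2, if_false, List.foldl_cons,
      List.foldl_nil, List.nil_append, List.append_nil, List.cons_append]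
  · -- both successors present
    rw [pvGet_set _ _ _ _ (by simp [Array.size_setIfInBounds]; omega)
          hv (by simp [Array.size_setIfInBounds]; omega)]
    rw [pvGet_set _ _ _ _ (by omega) hv hvlen]
    by_cases he2 : v = m * 3
    · rw [if_pos (show v.toNat = (m * 3).toNat by omega),
         if_pos (⟨Or.inr (by omega), hvn⟩ : (v = m + 1 ∨ v = 3 * m) ∧ v ≤ n)]
      congr 1
      subst he2
      unfold pvGet
      rw [Array.getElem?_setIfInBounds, if_neg (by omega : ¬ (m + 1).toNat = (m * 3).toNat)]
    · rw [if_neg (show ¬ v.toNat = (m * 3).toNat by omega)]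
      by_cases he1 : v = m + 1
      · rw [if_pos (show v.toNat = (m + 1).toNat by omega),
           if_pos (⟨Or.inl he1, hvn⟩ : (v = m + 1 ∨ v = 3 * m) ∧ v ≤ n)]
        subst he1; rfl
      · rw [if_neg (show ¬ v.toNat = (m + 1).toNat by omega),
           if_neg (show ¬((v = m + 1 ∨ v = 3 * m) ∧ v ≤ n) by omega)]
  · -- only m+1
    rw [pvGet_set _ _ _ _ (by omega) hv hvlen]
    by_cases he1 : v = m + 1
    · rw [if_pos (show v.toNat = (m + 1).toNat by omega),
         if_pos (⟨Or.inl he1, hvn⟩ : (v = m + 1 ∨ v = 3 * m) ∧ v ≤ n)]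
      subst he1; rfl
    · rw [if_neg (show ¬ v.toNat = (m + 1).toNat by omega),
         if_neg (show ¬((v = m + 1 ∨ v = 3 * m) ∧ v ≤ n) by omega)]
  · -- only 3m
    rw [pvGet_set _ _ _ _ (by omega) hv hvlen]
    by_cases he2 : v = m * 3
    · rw [if_pos (show v.toNat = (m * 3).toNat by omega),
         if_pos (⟨Or.inr (by omega), hvn⟩ : (v = m + 1 ∨ v = 3 * m) ∧ v ≤ n)]
      subst he2; rfl
    · rw [if_neg (show ¬ v.toNat = (m * 3).toNat by omega),
         if_neg (show ¬((v = m + 1 ∨ v = 3 * m) ∧ v ≤ n) by omega)]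
  · rw [if_neg (show ¬((v = m + 1 ∨ v = 3 * m) ∧ v ≤ n) by omega)]

lemma pvRelax_inv {n : Int} {dist : Array Int} {sps : List Int} {m : Int} (inv : pvInv n dist sps)
    (hm : m ∈ sps) (hne : m ≠ n)
    (hmin : ∀ v ∈ sps, pvGet dist m ≤ pvGet dist v) :
    pvInv n (pvRelax n m (pvGet dist m) dist) (sps.erase m) := by
  have hmd : pvGet dist m = pvdI m := pvExtract inv hm hmin
  obtain ⟨h1, h2, h3, h4, h5, h6, h7, h8⟩ := inv
  obtain ⟨hm1, hmn⟩ := h3 m hm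
  have G : ∀ v : Int, 0 ≤ v → v ≤ n →
      pvGet (pvRelax n m (pvGet dist m) dist) v =
        if (v = m + 1 ∨ v = 3 * m) ∧ v ≤ n then min (pvGet dist v) (pvGet dist m + 1)
        else pvGet dist v := fun v hv hvn => pvGet_pvRelax h1 hm1 hmn v hv hvn
  have hmem : ∀ v, v ∈ sps.erase m ↔ v ≠ m ∧ v ∈ sps := fun v => h2.mem_erase_iff
  refine ⟨?_, ?_, ?_, ?_, ?_, ?_, ?_, ?_⟩
  · rw [pvRelax_size]; exact h1
  · exact h2.erase m
  · exact fun v hv => h3 v (List.mem_of_mem_erase hv)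
  · exact (hmem n).mpr ⟨Ne.symm hne, h4⟩
  · intro v hv1 hvn hv
    by_cases hvm : v = m
    · subst hvm
      rw [G v (by omega) hvn, if_neg (show ¬((v = v + 1 ∨ v = 3 * v) ∧ v ≤ n) by omega)]
      exact hmd
    · have hvs : v ∉ sps := fun hc => hv ((hmem v).mpr ⟨hvm, hc⟩)
      rw [G v (by omega) hvn]
      split_ifs with hc
      · have hE : pvEdge n m v := ⟨hc.1, hc.2⟩
        have := pvdI_edge_le hm1 hE
        rw [h5 v hv1 hvn hvs, hmd]
        omega
      · exact h5 v hv1 hvn hvs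
  · intro v hv
    obtain ⟨hvm, hvs⟩ := (hmem v).mp hv
    obtain ⟨hv1, hvn⟩ := h3 v hvs
    rw [G v (by omega) hvn]
    split_ifs with hc
    · have := pvdI_edge_le hm1 (⟨hc.1, hc.2⟩ : pvEdge n m v)
      have := h6 v hvs
      rw [hmd]
      omega
    · exact h6 v hvs
  · intro u w hu1 hun hu hw hE
    obtain ⟨hwm, hws⟩ := (hmem w).mp hw
    obtain ⟨hw1, hwn⟩ := h3 w hws
    by_cases hum : u = m
    · subst hum
      rw [G w (by omega) hwn, if_pos (⟨hE.1, hE.2⟩ : (w = u + 1 ∨ w = 3 * u) ∧ w ≤ n)]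
      rw [hmd]
      exact le_trans (min_le_right _ _) (by omega)
    · have hus : u ∉ sps := fun hc => hu ((hmem u).mpr ⟨hum, hc⟩)
      have h7' := h7 u w hu1 hun hus hws hE
      rw [G w (by omega) hwn]
      split_ifs with hc
      · exact le_trans (min_le_left _ _) h7'
      · exact h7'
  · intro hone
    obtain ⟨h1m, h1s⟩ := (hmem 1).mp hone
    rw [G 1 (by omega) (le_trans hm1 hmn), if_neg (show ¬(((1:Int) = m + 1 ∨ (1:Int) = 3 * m) ∧ (1:Int) ≤ n) by omega)]
    exact h8 h1s

lemma pvDiscard_eq_erase {sps : List Int} (h : sps.Nodup) (m : Int) :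
    PySem.Set.discard sps m = sps.erase m := by
  rw [List.Nodup.erase_eq_filter h, PySem.Set.discard]
  rfl

lemma pvLoop_spec {n : Int} (hn : 1 ≤ n) (hN : n ≤ pvINF) :
    ∀ (fuel : Nat) (dist : Array Int) (sps : List Int), pvInv n dist sps → sps.length < fuel →
      pvGet (pvLoop n fuel dist sps) n = pvdI n := by
  intro fuel
  induction fuel with
  | zero => intro dist sps _ hlt; omega
  | succ fuel ih =>
    intro dist sps inv hlt
    rw [pvLoop]
    cases hr : (pvFindMin dist sps).2 with
    | none =>
      exfalso
      obtain ⟨w, hw, hle⟩ := pvReach inv n inv.2.2.2.1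
      have hbig := pvFindMin_none hr w hw
      have hsmall : pvdI n ≤ n - 1 := pvdI_le n hn
      unfold pvINF at hbig hN
      omega
    | some m =>
      obtain ⟨hm, hval, hmin⟩ := pvFindMin_some hr
      by_cases hmn : m = n
      · subst hmn
        simp only [if_pos rfl]
        exact pvExtract inv hm hmin
      · simp only [if_neg hmn]
        rw [PySem.Set.remove?_of_mem hm, Option.getD_some, pvDiscard_eq_erase inv.2.1]
        have inv' := pvRelax_inv inv hm hmn hmin
        rw [hval]
        exact ih _ _ inv' (by
          have h9 := List.length_erase_of_mem hm
          have h10 : 0 < sps.length := List.length_pos_of_mem hm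
          omega)

lemma pvInit {n : Int} (hn : 1 ≤ n) (hN : n ≤ pvINF) :
    pvInv n ((PySem.List.pyRepeat [pvINF] (n + 1)).toArray.setIfInBounds 1 0)
      (PySem.List.pyRange 1 (n + 1) 1) := by
  have hlen0 : (PySem.List.pyRepeat [pvINF] (n + 1)).toArray.size = (n + 1).toNat := by
    rw [PySem.List.pyRepeat_singleton]; simp
  have hget0 : ∀ v : Int, 0 ≤ v → v ≤ n →
      pvGet (PySem.List.pyRepeat [pvINF] (n + 1)).toArray v = pvINF := by
    intro v hv hvn
    unfold pvGet
    rw [show PySem.List.pyRepeat [pvINF] (n + 1) = List.replicate (n + 1).toNat pvINF from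
          PySem.List.pyRepeat_singleton _ _]
    rw [Array.getElem?_eq_getElem (by simp; omega)]
    rw [List.getElem_toArray, List.getElem_replicate]
    rfl
  have hget : ∀ v : Int, 0 ≤ v → v ≤ n →
      pvGet ((PySem.List.pyRepeat [pvINF] (n + 1)).toArray.setIfInBounds 1 0) v =
        if v = 1 then 0 else pvINF := by
    intro v hv hvn
    rw [pvGet_set _ _ _ _ (by omega) hv (by omega)]
    by_cases h : v = 1
    · rw [if_pos (by omega : v.toNat = 1), if_pos h]
    · rw [if_neg (by omega : ¬ v.toNat = 1), if_neg h]
      exact hget0 v hv hvn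
  refine ⟨?_, PySem.List.nodup_pyRange_one 1 (n+1), ?_, ?_, ?_, ?_, ?_, ?_⟩
  · rw [Array.size_setIfInBounds]; exact hlen0
  · intro v hv
    have := (PySem.List.mem_pyRange_one).mp hv
    omega
  · exact (PySem.List.mem_pyRange_one).mpr (by omega)
  · intro v hv1 hvn hv
    exact absurd ((PySem.List.mem_pyRange_one).mpr (by omega)) hv
  · intro v hv
    have hb := (PySem.List.mem_pyRange_one).mp hv
    rw [hget v (by omega) (by omega)]
    split_ifs with h
    · subst h; simp [pvdI, pvD]
    · have := pvdI_le v (by omega)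
      omega
  · intro u v hu1 hun hu hv hE
    exact absurd ((PySem.List.mem_pyRange_one).mpr (by omega)) hu
  · intro h1
    rw [hget 1 (by omega) hn, if_pos rfl]

lemma solve_eq_pvdI {n : Int} (hn : 1 ≤ n) (hN : n ≤ pvINF) : solve n = pvdI n := by
  unfold solve
  rw [PySem.Set.ofList_eq_self_of_nodup _ (PySem.List.nodup_pyRange_one 1 (n+1))]
  exact pvLoop_spec hn hN _ _ _ (pvInit hn hN) (by omega)

lemma pvB_fold (m : Nat) (hm : 1 ≤ m) :
    (PySem.List.pyRange 2 ((m : Int) + 1) 1).foldl pvStep [0, 0] =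
      (List.range (m + 1)).map (fun k => (pvD k : Int)) := by
  induction m with
  | zero => omega
  | succ m ih =>
    by_cases hm1 : 1 ≤ m
    · push_cast
      have step := PySem.List.pyRange_one_succ_right (a := 2) (b := (m : Int) + 1) (by omega)
      rw [step, List.foldl_append, ih hm1]
      simp only [List.foldl_cons, List.foldl_nil]
      unfold pvStep
      have hlen : ((List.range (m + 1)).map (fun k => (pvD k : Int))).length = m + 1 := by simp
      have hg1 : PySem.List.pyGetD ((List.range (m + 1)).map (fun k => (pvD k : Int))) ((m : Int) + 1 - 1) 0 = (pvD m : Int) := by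
        rw [show (m : Int) + 1 - 1 = ((m : Nat) : Int) by ring]
        rw [PySem.List.pyGetD_natCast]
        exact PySem.List.getD_map_range _ _ _ _ (by omega)
      have hmod : PySem.Int.mod ((m : Int) + 1) 3 = (((m + 1) % 3 : Nat) : Int) := by
        rw [show (m : Int) + 1 = ((m + 1 : Nat) : Int) by push_cast; ring]
        exact PySem.Int.mod_natCast _ _
      have hdiv : PySem.Int.floordiv ((m : Int) + 1) 3 = (((m + 1) / 3 : Nat) : Int) := by
        rw [show (m : Int) + 1 = ((m + 1 : Nat) : Int) by push_cast; ring]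
        exact PySem.Int.floordiv_natCast _ _
      have hg3 : PySem.List.pyGetD ((List.range (m + 1)).map (fun k => (pvD k : Int))) (((m + 1) / 3 : Nat) : Int) 0 = (pvD ((m + 1) / 3) : Int) := by
        rw [PySem.List.pyGetD_natCast]
        exact PySem.List.getD_map_range _ _ _ _ (by omega)
      rw [hg1, hmod, hdiv, hg3]
      rw [show List.range (m+1+1) = List.range (m+1) ++ [m+1] from List.range_succ, List.map_append]
      simp only [List.map_cons, List.map_nil]
      rw [pvD_two_le (m + 1) (by omega)]
      simp only [show m + 1 - 1 = m from by omega]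
      by_cases h3 : (m + 1) % 3 = 0
      · rw [if_pos (show ((((m+1) % 3 : Nat)) : Int) = 0 by exact_mod_cast h3), if_pos h3]
        push_cast
        rw [← min_add_add_right]
      · rw [if_neg (show ¬((((m+1) % 3 : Nat)) : Int) = 0 by exact_mod_cast h3), if_neg h3]
        push_cast
        rfl
    · have hm0 : m = 0 := by omega
      subst hm0
      norm_num
      simp [List.range_succ, pvD]

lemma solve_alt_eq_pvdI {n : Int} (hn : 1 ≤ n) : solve_alt n = pvdI n := by
  unfold solve_alt
  rw [show n + 1 = ((n.toNat : Int) + 1) by omega, pvB_fold n.toNat (by omega)]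
  rw [show n = ((n.toNat : Nat) : Int) by omega, PySem.List.pyGetD_natCast]
  unfold pvdI
  exact PySem.List.getD_map_range _ _ _ _ (by omega)

-- ===== VERDICT (by name: the statement is the Claim_ definition above) =====
theorem solve_spec : Claim_equal_solve := by
  intro n hdom hpre
  have hN : n ≤ pvINF := by
    simp only [Dom_solve, pvDomInt, decide_eq_true_eq] at hdom
    exact_mod_cast hdom.2
  unfold Spec_solve
  rw [solve_eq_pvdI hpre hN, solve_alt_eq_pvdI hpre]
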